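-- pv_equiv track=rewrite | github.com/carlosresu/esoa | pipelines/drugs/scripts/generic_normalization.py | split_molecules
-- ===== SOURCE A (Python) =====
-- from typing import List, Tuple
--
-- UPPERCASE_WORD = "UPPERCASE_WORD"
--
-- CONNECTIVE = "CONNECTIVE"
--
-- SALT_UNIT_SET = {
--     "SODIUM CHLORIDE",
--     "POTASSIUM CHLORIDE",
--     "MAGNESIUM SULFATE",
--     "CALCIUM GLUCONATE",
-- }
--
-- def split_molecules(tokens: List[str], classifications: List[str]) -> List[List[str]]:
--     """Split the molecule block into contiguous uppercase phrases separated by connectors."""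
--     molecules: List[List[str]] = []
--     current: List[str] = []
--     for token, classification in zip(tokens, classifications):
--         if classification == CONNECTIVE:
--             if current:
--                 molecules.append(current.copy())
--                 current = []
--             continue
--         if classification == UPPERCASE_WORD:
--             current.append(token)
--         else:
--             continue
--     if current:
--         molecules.append(current.copy())
--     return detect_salt_units(molecules)
--
-- def detect_salt_units(molecules: List[List[str]]) -> List[List[str]]:
--     """Merge salt pairs that would otherwise launch singleton outputs (Section 7)."""
--     if not molecules:
--         return []
--     merged: List[List[str]] = []
--     idx = 0
--     while idx < len(molecules):
--         current = molecules[idx]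
--         next_idx = idx + 1
--         if next_idx < len(molecules):
--             next_molecule = molecules[next_idx]
--             if len(current) == 1 and len(next_molecule) == 1:
--                 combined = f"{current[0].upper()} {next_molecule[0].upper()}"
--                 if combined in SALT_UNIT_SET:
--                     merged.append([combined])
--                     idx += 2
--                     continue
--         merged.append(current)
--         idx += 1
--     return merged
-- ===== SOURCE B (Python) =====
-- UPPERCASE_WORD = "UPPERCASE_WORD"
-- CONNECTIVE = "CONNECTIVE"
-- SALT_UNIT_SET = {
--     "SODIUM CHLORIDE",
--     "POTASSIUM CHLORIDE",
--     "MAGNESIUM SULFATE",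
--     "CALCIUM GLUCONATE",
-- }
--
-- def split_molecules(tokens, classifications):
--     """One linear pass: close groups on connectives and merge salt pairs on the fly."""
--     out = []
--     pending = None  # last completed group, still eligible for a salt merge
--     current = []
--
--     def close():
--         nonlocal pending, current
--         if not current:
--             return
--         group, current = current, []
--         if pending is not None and len(pending) == 1 and len(group) == 1:
--             combined = f"{pending[0].upper()} {group[0].upper()}"
--             if combined in SALT_UNIT_SET:
--                 out.append([combined])
--                 pending = None
--                 return
--         if pending is not None:
--             out.append(pending)
--         pending = group
--
--     for token, classification in zip(tokens, classifications):
--         if classification == CONNECTIVE: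
--             close()
--         elif classification == UPPERCASE_WORD:
--             current.append(token)
--     close()
--     if pending is not None:
--         out.append(pending)
--     return out
-- ===== Notes on version B (the rewrite author's own statement) =====
-- stated objective: alternative
-- what changed: A first collects all uppercase groups into a list and then runs a second pairwise salt-merge pass over that list; B is a single linear pass over zip(tokens, classifications) that merges salt pairs on the fly using a one-group pending buffer, never materialising the intermediate group list.
import Mathlib
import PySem

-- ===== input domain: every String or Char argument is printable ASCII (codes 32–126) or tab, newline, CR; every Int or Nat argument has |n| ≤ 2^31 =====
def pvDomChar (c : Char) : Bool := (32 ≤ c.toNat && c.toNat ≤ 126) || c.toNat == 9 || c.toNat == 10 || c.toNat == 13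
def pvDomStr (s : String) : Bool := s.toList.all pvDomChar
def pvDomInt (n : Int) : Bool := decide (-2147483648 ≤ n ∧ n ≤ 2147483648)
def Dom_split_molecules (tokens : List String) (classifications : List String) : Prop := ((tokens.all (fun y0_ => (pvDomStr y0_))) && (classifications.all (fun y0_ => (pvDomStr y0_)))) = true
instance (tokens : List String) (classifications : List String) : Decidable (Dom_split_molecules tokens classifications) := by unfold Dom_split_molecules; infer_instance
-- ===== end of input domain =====

-- B replaces A's two passes (group collection, then a pairwise salt-merge over the group list)
-- by one linear pass that merges salt pairs on the fly via a one-group 'pending' buffer (objective: alternative).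

def SALT_UNIT_SET : PySem.Set String := PySem.Set.ofList
  ["SODIUM CHLORIDE", "POTASSIUM CHLORIDE", "MAGNESIUM SULFATE", "CALCIUM GLUCONATE"]

-- ===== PORT A =====
-- helper detect_salt_units: the while loop with idx += 1 / idx += 2 as structural recursion;
-- the 'len == 1' guards become the [a], [b] patterns (exact).
def detect_salt_units : List (List String) → List (List String)
  | [] => []
  | [cur] => [cur]
  | cur :: next :: rest' =>
    match cur, next with
    | [a], [b] =>
      let combined := PySem.Str.upper a ++ " " ++ PySem.Str.upper b
      if SALT_UNIT_SET.contains combined then [combined] :: detect_salt_units rest'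
      else [a] :: detect_salt_units ([b] :: rest')
    | _, _ => cur :: detect_salt_units (next :: rest')
  termination_by l => l.length
  decreasing_by all_goals (simp only [List.length_cons]; omega)

def aStep (acc : List (List String) × List String) (tc : String × String) :
    List (List String) × List String :=
  if tc.2 = "CONNECTIVE" then
    if acc.2 ≠ [] then (acc.1 ++ [acc.2], []) else acc
  else if tc.2 = "UPPERCASE_WORD" then (acc.1, acc.2 ++ [tc.1])
  else acc

def split_molecules (tokens : List String) (classifications : List String) : List (List String) :=
  let acc := (tokens.zip classifications).foldl aStep ([], [])
  detect_salt_units (if acc.2 ≠ [] then acc.1 ++ [acc.2] else acc.1)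

-- ===== PORT B =====
-- state: ((out, pending), current); pushGroup is the body of Source B's close() on a nonempty group.
def pushGroup (op : List (List String) × Option (List String)) (g : List String) :
    List (List String) × Option (List String) :=
  match op.2 with
  | none => (op.1, some g)
  | some p =>
    match p, g with
    | [a], [b] =>
      let combined := PySem.Str.upper a ++ " " ++ PySem.Str.upper b
      if SALT_UNIT_SET.contains combined then (op.1 ++ [[combined]], none)
      else (op.1 ++ [[a]], some [b])
    | _, _ => (op.1 ++ [p], some g)

def closeGroup (st : (List (List String) × Option (List String)) × List String) :
    (List (List String) × Option (List String)) × List String :=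
  if st.2 = [] then st else (pushGroup st.1 st.2, [])

def bStep (st : (List (List String) × Option (List String)) × List String)
    (tc : String × String) : (List (List String) × Option (List String)) × List String :=
  if tc.2 = "CONNECTIVE" then closeGroup st
  else if tc.2 = "UPPERCASE_WORD" then (st.1, st.2 ++ [tc.1])
  else st

def split_molecules_alt (tokens : List String) (classifications : List String) : List (List String) :=
  let st := closeGroup ((tokens.zip classifications).foldl bStep (([], none), []))
  st.1.1 ++ st.1.2.toList

-- ===== PRECONDITION & SPEC =====
def Spec_split_molecules (tokens : List String) (classifications : List String) (out : List (List String)) : Prop := out = split_molecules_alt tokens classifications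
instance (tokens : List String) (classifications : List String) (out : List (List String)) : Decidable (Spec_split_molecules tokens classifications out) := by unfold Spec_split_molecules; infer_instance

-- ===== CLAIM (what is proved, stated in full; the proofs are below) =====
def Claim_equal_split_molecules : Prop := ∀ (tokens : List String) (classifications : List String), Dom_split_molecules tokens classifications → Spec_split_molecules tokens classifications (split_molecules tokens classifications)

-- ===== LEMMAS AND PROOFS =====

-- streaming pushGroup over a list of completed groups computes detect_salt_units of it
lemma finish_foldl_push (gs : List (List String)) :
    ∀ (out : List (List String)) (p : Option (List String)),
      (gs.foldl pushGroup (out, p)).1 ++ (gs.foldl pushGroup (out, p)).2.toList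
        = out ++ detect_salt_units (p.toList ++ gs) := by
  induction gs with
  | nil =>
    intro out p
    cases p with
    | none => simp [detect_salt_units]
    | some q => simp [detect_salt_units]
  | cons g rest ih =>
    intro out p
    simp only [List.foldl_cons]
    cases p with
    | none =>
      have h : pushGroup (out, none) g = (out, some g) := rfl
      rw [h, ih]
      simp
    | some q =>
      match q, g with
      | [a], [b] =>
        by_cases h : (PySem.Str.upper a ++ " " ++ PySem.Str.upper b) ∈ SALT_UNIT_SET
        · have hp : pushGroup (out, some [a]) [b]
              = (out ++ [[PySem.Str.upper a ++ " " ++ PySem.Str.upper b]], none) := by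
            simp [pushGroup, h]
          rw [hp, ih]
          simp [detect_salt_units, h]
        · have hp : pushGroup (out, some [a]) [b] = (out ++ [[a]], some [b]) := by
            simp [pushGroup, h]
          rw [hp, ih]
          simp [detect_salt_units, h]
      | [], g =>
        have hp : pushGroup (out, some []) g = (out ++ [[]], some g) := rfl
        rw [hp, ih]
        simp [detect_salt_units]
      | x :: y :: zs, g =>
        have hp : pushGroup (out, some (x :: y :: zs)) g = (out ++ [x :: y :: zs], some g) := rfl
        rw [hp, ih]
        simp [detect_salt_units]
      | [a], [] =>
        have hp : pushGroup (out, some [a]) [] = (out ++ [[a]], some []) := rfl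
        rw [hp, ih]
        simp [detect_salt_units]
      | [a], x :: y :: zs =>
        have hp : pushGroup (out, some [a]) (x :: y :: zs)
            = (out ++ [[a]], some (x :: y :: zs)) := rfl
        rw [hp, ih]
        simp [detect_salt_units]

-- the two loop passes agree, relating B's (out, pending) state to A's collected group list
lemma loop_eq (pairs : List (String × String)) :
    ∀ (ms : List (List String)) (cur : List String),
      (closeGroup (pairs.foldl bStep (ms.foldl pushGroup ([], none), cur))).1.1
        ++ (closeGroup (pairs.foldl bStep (ms.foldl pushGroup ([], none), cur))).1.2.toList
      = detect_salt_units
          (if (pairs.foldl aStep (ms, cur)).2 ≠ []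
            then (pairs.foldl aStep (ms, cur)).1 ++ [(pairs.foldl aStep (ms, cur)).2]
            else (pairs.foldl aStep (ms, cur)).1) := by
  induction pairs with
  | nil =>
    intro ms cur
    simp only [List.foldl_nil]
    by_cases hc : cur = []
    · subst hc
      have hcg : closeGroup (ms.foldl pushGroup ([], none), ([] : List String))
          = (ms.foldl pushGroup ([], none), []) := by simp [closeGroup]
      rw [hcg]
      simpa using finish_foldl_push ms [] none
    · have hcg : closeGroup (ms.foldl pushGroup ([], none), cur)
          = (pushGroup (ms.foldl pushGroup ([], none)) cur, []) := by simp [closeGroup, hc]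
      rw [hcg]
      have hp : pushGroup (ms.foldl pushGroup ([], none)) cur
          = (ms ++ [cur]).foldl pushGroup ([], none) := by simp [List.foldl_append]
      rw [hp]
      have hf := finish_foldl_push (ms ++ [cur]) [] none
      simp only [Option.toList_none, List.nil_append] at hf
      simpa [hc] using hf
  | cons tc rest ih =>
    intro ms cur
    simp only [List.foldl_cons]
    by_cases h1 : tc.2 = "CONNECTIVE"
    · by_cases hc : cur = []
      · have hb : bStep (ms.foldl pushGroup ([], none), cur)
            tc = (ms.foldl pushGroup ([], none), cur) := by
          simp [bStep, h1, closeGroup, hc]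
        have ha : aStep (ms, cur) tc = (ms, cur) := by simp [aStep, h1, hc]
        rw [hb, ha]
        exact ih ms cur
      · have hb : bStep (ms.foldl pushGroup ([], none), cur) tc
            = ((ms ++ [cur]).foldl pushGroup ([], none), []) := by
          simp [bStep, h1, closeGroup, hc, List.foldl_append]
        have ha : aStep (ms, cur) tc = (ms ++ [cur], []) := by simp [aStep, h1, hc]
        rw [hb, ha]
        exact ih (ms ++ [cur]) []
    · by_cases h2 : tc.2 = "UPPERCASE_WORD"
      · have hb : bStep (ms.foldl pushGroup ([], none), cur) tc
            = (ms.foldl pushGroup ([], none), cur ++ [tc.1]) := by simp [bStep, h2]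
        have ha : aStep (ms, cur) tc = (ms, cur ++ [tc.1]) := by simp [aStep, h2]
        rw [hb, ha]
        exact ih ms (cur ++ [tc.1])
      · have hb : bStep (ms.foldl pushGroup ([], none), cur) tc
            = (ms.foldl pushGroup ([], none), cur) := by simp [bStep, h1, h2]
        have ha : aStep (ms, cur) tc = (ms, cur) := by simp [aStep, h1, h2]
        rw [hb, ha]
        exact ih ms cur

-- ===== VERDICT (by name: the statement is the Claim_ definition above) =====
theorem split_molecules_spec : Claim_equal_split_molecules := by
  intro tokens classifications _
  unfold Spec_split_molecules split_molecules split_molecules_alt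
  have := loop_eq (tokens.zip classifications) [] []
  simpa using this.symm
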